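-- pv_equiv track=rewrite | github.com/Mikiyas1221/Solutions-for-A2SV | Largest Local Values in a Matrix.py | largestLocal
-- ===== SOURCE A (Python) =====
-- from typing import List
--
-- def largestLocal(grid: List[List[int]]) -> List[List[int]]:
--     n = len(grid)
--     ans = [[0 for i in range(n - 2)] for j in range(n - 2)]
--     for i in range(n - 2):
--         for j in range(n - 2):
--             my_max = 0
--             for k in  range(i, i+3):
--                 for p in range(j, j+3):
--                     my_max = max(my_max, grid[k][p])
--             ans[i][j] = my_max
--     return ans
-- ===== SOURCE B (Python) =====
-- from typing import List
--
-- def largestLocal(grid: List[List[int]]) -> List[List[int]]: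
--     n = len(grid)
--     m = n - 2
--     # separable max filter: horizontal 1x3 pass (clamped at 0), then vertical 3x1 pass
--     H = [[max(0, row[j], row[j + 1], row[j + 2]) for j in range(m)] for row in grid]
--     return [[max(H[i][j], H[i + 1][j], H[i + 2][j]) for j in range(m)] for i in range(m)]
-- ===== Notes on version B (the rewrite author's own statement) =====
-- stated objective: alternative
-- what changed: Replaces the single nested 3x3 scan (9 reads per output cell) by a separable filter: a horizontal 1x3 max pass building an intermediate table, then a vertical 3x1 max pass over it (6 reads per cell).
import Mathlib
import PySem

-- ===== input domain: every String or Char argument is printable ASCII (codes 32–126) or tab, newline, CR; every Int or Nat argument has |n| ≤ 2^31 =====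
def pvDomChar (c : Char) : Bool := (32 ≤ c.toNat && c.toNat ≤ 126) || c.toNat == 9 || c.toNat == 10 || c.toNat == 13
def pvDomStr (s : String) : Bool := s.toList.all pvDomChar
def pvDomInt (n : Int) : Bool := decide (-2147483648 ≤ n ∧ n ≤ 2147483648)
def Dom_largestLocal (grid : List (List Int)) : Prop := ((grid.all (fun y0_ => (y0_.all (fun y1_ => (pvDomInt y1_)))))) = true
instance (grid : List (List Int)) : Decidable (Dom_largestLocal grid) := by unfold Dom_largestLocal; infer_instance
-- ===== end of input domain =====

-- B computes the same 3x3 local maxima as A via a separable filter (horizontal 1x3 pass,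
-- then vertical 3x1 pass over the intermediate table) instead of one nested 3x3 scan;
-- the 0 seed of A's running max becomes the clamp in the horizontal pass.


-- ===== PORT A =====
-- grid[k][p]: exact under Pre_ (both indices in range); IndexError inputs are excluded by Pre_.
def pvGet2 (g : List (List Int)) (k p : Int) : Int :=
  PySem.List.pyGetD (PySem.List.pyGetD g k []) p 0

def largestLocal (grid : List (List Int)) : List (List Int) :=
  let n : Int := grid.length
  (PySem.List.pyRange 0 (n - 2) 1).map (fun i =>
    (PySem.List.pyRange 0 (n - 2) 1).map (fun j =>
      (PySem.List.pyRange i (i + 3) 1).foldl (fun acc k =>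
        (PySem.List.pyRange j (j + 3) 1).foldl (fun acc2 p =>
          max acc2 (pvGet2 grid k p)) acc) 0))

-- ===== PORT B =====
def largestLocal_alt (grid : List (List Int)) : List (List Int) :=
  let n : Int := grid.length
  let m : Int := n - 2
  let H : List (List Int) := grid.map (fun row =>
    (PySem.List.pyRange 0 m 1).map (fun j =>
      max (max (max 0 (PySem.List.pyGetD row j 0)) (PySem.List.pyGetD row (j + 1) 0))
          (PySem.List.pyGetD row (j + 2) 0)))
  (PySem.List.pyRange 0 m 1).map (fun i =>
    (PySem.List.pyRange 0 m 1).map (fun j =>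
      max (max (pvGet2 H i j) (pvGet2 H (i + 1) j)) (pvGet2 H (i + 2) j)))

-- ===== PRECONDITION & SPEC =====
-- Pre_ excludes exactly the inputs where Python A raises IndexError: with n ≥ 3 some row
-- shorter than n (A reads grid[k][p] for all k < n, p < n).  Python B raises there too.
def Pre_largestLocal (grid : List (List Int)) : Prop :=
  grid.length < 3 ∨ ∀ row ∈ grid, grid.length ≤ row.length

instance (grid : List (List Int)) : Decidable (Pre_largestLocal grid) := by
  unfold Pre_largestLocal; infer_instance

def pvWitness_largestLocal : List (List Int) := [[9, 1, 2], [3, -4, 5], [6, 7, 8]]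

def Spec_largestLocal (grid : List (List Int)) (out : List (List Int)) : Prop := out = largestLocal_alt grid
instance (grid : List (List Int)) (out : List (List Int)) : Decidable (Spec_largestLocal grid out) := by unfold Spec_largestLocal; infer_instance

-- ===== CLAIM (what is proved, stated in full; the proofs are below) =====
def Claim_equal_largestLocal : Prop := ∀ (grid : List (List Int)), Dom_largestLocal grid → Pre_largestLocal grid → Spec_largestLocal grid (largestLocal grid)

-- ===== LEMMAS AND PROOFS =====

lemma chainStep (A d e f : Int) (h : 0 ≤ A) :
    max (max (max A d) e) f = max A (max (max (max 0 d) e) f) := by omega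

lemma pyRange3 (a : Int) : PySem.List.pyRange a (a + 3) 1 = [a, a + 1, a + 2] := by
  rw [PySem.List.pyRange_one]
  norm_num [show ((a + 3) - a).toNat = 3 from by omega, show Int.toNat 3 = 3 from rfl,
    List.range_succ]

-- the nine-term left fold of A equals B's three-by-three grouping
lemma nineMax (a b c d e f g h i : Int) :
    max (max (max (max (max (max (max (max (max 0 a) b) c) d) e) f) g) h) i
      = max (max (max (max (max 0 a) b) c) (max (max (max 0 d) e) f))
          (max (max (max 0 g) h) i) := by
  rw [chainStep (max (max (max 0 a) b) c) d e f (by omega)]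
  exact chainStep (max (max (max (max 0 a) b) c) (max (max (max 0 d) e) f)) g h i (by omega)

-- ===== VERDICT (by name: the statement is the Claim_ definition above) =====
theorem largestLocal_spec : Claim_equal_largestLocal := by
  intro grid _ hpre
  unfold Spec_largestLocal largestLocal largestLocal_alt
  simp only []
  rcases hpre with hsmall | hrows
  · -- n < 3: both outer ranges are empty
    have : PySem.List.pyRange 0 ((grid.length : Int) - 2) 1 = [] := by
      rw [PySem.List.pyRange_one]
      simp
      omega
    simp [this]
  · -- square-enough case: compare entrywise
    apply List.map_congr_left
    intro i hi
    rw [PySem.List.mem_pyRange_one] at hi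
    apply List.map_congr_left
    intro j hj
    rw [PySem.List.mem_pyRange_one] at hj
    have hn3 : (3 : Int) ≤ grid.length := by omega
    -- reduce B's reads of H to reads of grid
    have hHget : ∀ k : Int, 0 ≤ k → k < (grid.length : Int) → ∀ jj : Int, 0 ≤ jj →
        jj < (grid.length : Int) - 2 →
        pvGet2 (grid.map (fun row =>
          (PySem.List.pyRange 0 ((grid.length : Int) - 2) 1).map (fun j' =>
            max (max (max 0 (PySem.List.pyGetD row j' 0)) (PySem.List.pyGetD row (j' + 1) 0))
              (PySem.List.pyGetD row (j' + 2) 0)))) k jj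
          = max (max (max 0 (pvGet2 grid k jj)) (pvGet2 grid k (jj + 1)))
              (pvGet2 grid k (jj + 2)) := by
      intro k hk0 hkn jj hj0 hjm
      have hkN : k.toNat < grid.length := by omega
      have hrow : grid.length ≤ (grid[k.toNat]).length :=
        hrows _ (List.getElem_mem hkN)
      unfold pvGet2
      rw [PySem.List.pyGetD_eq_getElem (grid.map (fun row =>
        (PySem.List.pyRange 0 ((grid.length : Int) - 2) 1).map (fun j' =>
          max (max (max 0 (PySem.List.pyGetD row j' 0)) (PySem.List.pyGetD row (j' + 1) 0))
            (PySem.List.pyGetD row (j' + 2) 0)))) [] hk0 (by simpa using hkn)]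
      simp only [List.getElem_map]
      rw [PySem.List.pyGetD_map_pyRange_of_nonneg _ _ _ _ hj0 hjm]
      rw [PySem.List.pyGetD_eq_getElem grid [] hk0 (by omega)]
    rw [hHget i (by omega) (by omega) j (by omega) (by omega),
        hHget (i + 1) (by omega) (by omega) j (by omega) (by omega),
        hHget (i + 2) (by omega) (by omega) j (by omega) (by omega)]
    -- expand A's 3x3 fold
    rw [pyRange3 i, pyRange3 j]
    simp only [List.foldl]
    exact nineMax _ _ _ _ _ _ _ _ _
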